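-- pv_equiv track=rewrite | github.com/ored95/sussex24 | R1G1.py | Solution
-- ===== SOURCE A (Python) =====
-- def Solution(paths: list[list[str]]) -> str:
--     d = dict()
--     for path in paths:
--         if path[0] in d.keys():     # source
--             d[path[0]] += 1
--         else:
--             d[path[0]] = 1
--
--         if path[1] not in d.keys(): # destination
--             d[path[1]] = 0
--
--     for city in d:
--         if d[city] == 0:
--             return city
--     return ''   # never reached
-- ===== SOURCE B (Python) =====
-- def Solution(paths: list[list[str]]) -> str:
--     for p in paths:
--         if all(q[0] != p[1] for q in paths):
--             return p[1]
--     return ''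
-- ===== Notes on version B (the rewrite author's own statement) =====
-- stated objective: alternative
-- what changed: B drops A's insertion-ordered outgoing-edge counter dict entirely: it does a brute-force nested scan, returning the first destination for which a full scan of paths finds no equal source, trading A's hash index for two plain loops.
import Mathlib
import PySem

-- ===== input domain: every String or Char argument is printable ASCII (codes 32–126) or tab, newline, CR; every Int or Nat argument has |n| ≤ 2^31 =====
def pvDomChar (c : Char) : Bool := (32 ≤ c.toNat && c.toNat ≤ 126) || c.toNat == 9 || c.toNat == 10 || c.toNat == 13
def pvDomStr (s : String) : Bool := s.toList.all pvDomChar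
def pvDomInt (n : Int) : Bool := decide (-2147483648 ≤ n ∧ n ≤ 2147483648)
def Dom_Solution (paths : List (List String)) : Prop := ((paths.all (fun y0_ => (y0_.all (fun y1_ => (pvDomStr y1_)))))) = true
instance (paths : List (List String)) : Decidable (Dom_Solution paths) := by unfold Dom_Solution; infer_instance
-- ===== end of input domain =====

-- B drops A's outgoing-edge counter dict for a brute-force nested scan over paths
-- (objective: alternative, same return value; no speed claim).

-- ===== PORT A =====
-- second loop of A: first key of the dict whose count is 0, else ''
def pvFirstZero : List (String × Int) → String
  | [] => ""
  | (c, v) :: rest => if v == 0 then c else pvFirstZero rest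

def Solution (paths : List (List String)) : String :=
  let d := paths.foldl (fun d path =>
    let s := PySem.List.pyGetD path 0 ""   -- path[0]; Pre_ keeps the index in range
    let t := PySem.List.pyGetD path 1 ""   -- path[1]
    let d1 := if d.contains s then d.modify s 0 (· + 1) else d.insert s 1
    if d1.contains t then d1 else d1.insert t 0) PySem.Dict.empty
  pvFirstZero d.items

-- ===== PORT B =====
-- B's outer loop: first path whose destination never equals any path's source
-- (the inner `all(q[0] != p[1] for q in paths)` is List.all over the full list)
def pvFindB (paths : List (List String)) : List (List String) → String
  | [] => ""
  | p :: rest =>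
    let t := PySem.List.pyGetD p 1 ""
    if paths.all (fun q => PySem.List.pyGetD q 0 "" != t) then t
    else pvFindB paths rest

def Solution_alt (paths : List (List String)) : String :=
  pvFindB paths paths

-- ===== PRECONDITION & SPEC =====
-- Pre_ excludes exactly the inputs where some path has fewer than two entries: there Python A
-- (and Python B) raises IndexError on path[0]/path[1].
def Pre_Solution (paths : List (List String)) : Prop := ∀ p ∈ paths, 2 ≤ p.length
instance (paths : List (List String)) : Decidable (Pre_Solution paths) := by unfold Pre_Solution; infer_instance
def pvWitness_Solution : List (List String) := [["a", "b"], ["b", "c"]]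

def Spec_Solution (paths : List (List String)) (out : String) : Prop := out = Solution_alt paths
instance (paths : List (List String)) (out : String) : Decidable (Spec_Solution paths out) := by unfold Spec_Solution; infer_instance

-- ===== CLAIM (what is proved, stated in full; the proofs are below) =====
def Claim_equal_Solution : Prop := ∀ (paths : List (List String)), Dom_Solution paths → Pre_Solution paths → Spec_Solution paths (Solution paths)

-- ===== LEMMAS AND PROOFS =====

-- the body of A's first loop, over the extracted (source, destination) pair
def pvStep (d : PySem.Dict String Int) (p : String × String) : PySem.Dict String Int :=
  let d1 := if d.contains p.1 then d.modify p.1 0 (· + 1) else d.insert p.1 1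
  if d1.contains p.2 then d1 else d1.insert p.2 0

-- keys of d holding count 0, in insertion order
def pvZK (d : PySem.Dict String Int) : List String :=
  d.keys.filter (fun k => d.getD k 0 == 0)

lemma pvFirstZero_map (ks : List String) (v : String → Int) :
    pvFirstZero (ks.map (fun k => (k, v k))) = ((ks.filter (fun k => v k == 0)).head?).getD "" := by
  induction ks with
  | nil => rfl
  | cons k ks ih =>
      simp only [List.map_cons, pvFirstZero, List.filter_cons]
      by_cases h : v k == 0 <;> simp [h, ih]

lemma pvAllNeSrc (paths : List (List String)) (t : String) :
    (paths.all (fun q => PySem.List.pyGetD q 0 "" != t))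
      = !decide (t ∈ paths.map (fun q => PySem.List.pyGetD q 0 "")) := by
  induction paths with
  | nil => rfl
  | cons q rest ih =>
      simp only [List.all_cons, List.map_cons, List.mem_cons, ih]
      by_cases h : PySem.List.pyGetD q 0 "" = t
      · subst h; simp
      · have h1 : (PySem.List.pyGetD q 0 "" != t) = true := by
          simp only [bne_iff_ne, ne_eq]; exact h
        rw [h1]
        simp [show ¬ t = PySem.List.pyGetD q 0 "" from fun hh => h hh.symm]

lemma pvFindB_eq (paths : List (List String)) (l : List (List String)) :
    pvFindB paths l =
      (((l.map (fun p => PySem.List.pyGetD p 1 "")).filter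
          (fun c => !decide (c ∈ paths.map (fun q => PySem.List.pyGetD q 0 "")))).head?).getD "" := by
  induction l with
  | nil => rfl
  | cons p rest ih =>
      simp only [pvFindB, List.map_cons, List.filter_cons]
      rw [pvAllNeSrc paths (PySem.List.pyGetD p 1 "")]
      by_cases h : PySem.List.pyGetD p 1 "" ∈ paths.map (fun q => PySem.List.pyGetD q 0 "") <;>
        simp [h, ih]

lemma pvFoldlAdd (xs : List String) : ∀ acc : List String,
    xs.foldl PySem.Set.add acc = acc ++ (PySem.Set.ofList xs).filter (fun c => !decide (c ∈ acc)) := by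
  induction xs with
  | nil => intro acc; simp [PySem.Set.ofList]
  | cons x xs ih =>
      intro acc
      have hx : PySem.Set.ofList (x :: xs) = List.foldl PySem.Set.add [x] xs := by
        simp [PySem.Set.ofList_eq_foldl, List.foldl_cons, PySem.Set.add, PySem.Set.contains]
      rw [List.foldl_cons]
      by_cases h : x ∈ acc
      · have hadd : PySem.Set.add acc x = acc := by simp [PySem.Set.add, PySem.Set.contains, h]
        rw [hadd, ih acc, hx, ih [x], List.filter_append, List.filter_filter]
        simp only [List.mem_singleton, List.filter_cons]
        have : ∀ c ∈ PySem.Set.ofList xs, (!decide (c ∈ acc) && !decide (c = x)) = !decide (c ∈ acc) := by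
          intro c _
          by_cases hcx : c = x
          · subst hcx; simp [h]
          · simp [hcx]
        rw [List.filter_congr this]
        simp [h]
      · have hadd : PySem.Set.add acc x = acc ++ [x] := by simp [PySem.Set.add, PySem.Set.contains, h]
        rw [hadd, ih (acc ++ [x]), hx, ih [x], List.filter_append, List.filter_filter]
        simp only [List.mem_singleton, List.filter_cons]
        have : ∀ c ∈ PySem.Set.ofList xs, (!decide (c ∈ acc) && !decide (c = x)) = !decide (c ∈ acc ++ [x]) := by
          intro c _; simp [List.mem_append, Bool.and_comm]
        rw [List.filter_congr this]
        simp [h]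

lemma pvOfListCons (x : String) (xs : List String) :
    PySem.Set.ofList (x :: xs) = x :: (PySem.Set.ofList xs).filter (fun c => !decide (c = x)) := by
  have hx : PySem.Set.ofList (x :: xs) = List.foldl PySem.Set.add [x] xs := by
    simp [PySem.Set.ofList_eq_foldl, List.foldl_cons, PySem.Set.add, PySem.Set.contains]
  rw [hx, pvFoldlAdd xs [x]]
  simp

lemma pvHeadFilterDedup (xs : List String) (p : String → Bool) :
    ((PySem.List.dedup xs).filter p).head? = (xs.filter p).head? := by
  induction xs with
  | nil => rfl
  | cons x xs ih =>
      rw [PySem.List.dedup_eq_ofList, pvOfListCons, List.filter_cons, List.filter_cons]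
      by_cases h : p x = true
      · simp [h]
      · simp only [h, List.filter_filter, Bool.false_eq_true, if_false]
        rw [← ih, PySem.List.dedup_eq_ofList]
        congr 1
        apply List.filter_congr
        intro c _
        by_cases hcx : c = x
        · subst hcx; simp [h]
        · simp [hcx]

lemma pvStepFacts (d : PySem.Dict String Int) (s t : String)
    (hnd : d.keys.Nodup) (hnn : ∀ k, (0:Int) ≤ d.getD k 0) :
    (pvStep d (s, t)).keys.Nodup ∧
    (∀ k, (0:Int) ≤ (pvStep d (s, t)).getD k 0) ∧
    (∀ c, c ∈ (pvStep d (s, t)).keys ↔ c ∈ d.keys ∨ c = s ∨ c = t) ∧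
    pvZK (pvStep d (s, t)) =
      (pvZK d).filter (fun c => !decide (c = s)) ++
        (if t ∈ d.keys ∨ t = s then [] else [t]) := by
  by_cases hs : d.contains s = true
  · -- source already present: d1 = d.modify s 0 (· + 1)
    have hsk : s ∈ d.keys := (PySem.Dict.contains_iff_mem_keys d s).mp hs
    have hk1 : (d.modify s 0 (· + 1)).keys = d.keys := by
      rw [PySem.Dict.keys_modify, PySem.Dict.keys_insert_of_contains _ _ hs]
    have hg1 : ∀ k, (d.modify s 0 (· + 1)).getD k 0 = if k = s then d.getD s 0 + 1 else d.getD k 0 := by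
      intro k; exact PySem.Dict.getD_modify d s k 0 (· + 1)
    have hz1 : pvZK (d.modify s 0 (· + 1)) = (pvZK d).filter (fun c => !decide (c = s)) := by
      unfold pvZK
      rw [hk1, List.filter_filter]
      apply List.filter_congr
      intro c _
      rw [hg1 c]
      by_cases hcs : c = s
      · subst hcs
        have : (d.getD c 0 + 1 == 0) = false := by
          have h0 := hnn c; simp; omega
        simp [this]
      · simp [hcs]
    have hc1 : ∀ c, (d.modify s 0 (· + 1)).contains c = d.contains c := by
      intro c
      rw [PySem.Dict.contains_modify]
      by_cases hcs : c = s
      · subst hcs; simp [hs]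
      · simp [hcs]
    have hnd1 : (d.modify s 0 (· + 1)).keys.Nodup := by rw [hk1]; exact hnd
    simp only [pvStep, if_pos hs]
    by_cases ht : (d.modify s 0 (· + 1)).contains t = true
    · have htk : t ∈ d.keys := (PySem.Dict.contains_iff_mem_keys d t).mp ((hc1 t) ▸ ht)
      simp only [if_pos ht, hz1, hk1, hg1]
      refine ⟨hnd, ?_, ?_, ?_⟩
      · intro k; by_cases hks : k = s
        · subst hks; have := hnn k; simp; omega
        · simp only [if_neg hks]; exact hnn k
      · intro c; constructor
        · intro h; exact Or.inl h
        · rintro (h | rfl | rfl) <;> [exact h; exact hsk; exact htk]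
      · simp [htk]
    · have htk : ¬ t ∈ d.keys := fun hm =>
        ht ((hc1 t).symm ▸ (PySem.Dict.contains_iff_mem_keys d t).mpr hm)
      have hts : t ≠ s := fun h => htk (h ▸ hsk)
      have hne : (d.modify s 0 (· + 1)).contains t = false := by
        cases h : (d.modify s 0 (· + 1)).contains t
        · rfl
        · exact absurd h ht
      simp only [if_neg ht]
      have hk2 : ((d.modify s 0 (· + 1)).insert t 0).keys = d.keys ++ [t] := by
        rw [PySem.Dict.keys_insert_of_not_contains _ _ hne, hk1]
      have hg2 : ∀ k, ((d.modify s 0 (· + 1)).insert t 0).getD k 0 =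
          if k = t then 0 else (d.modify s 0 (· + 1)).getD k 0 := by
        intro k; exact PySem.Dict.getD_insert _ _ _ _ _
      refine ⟨?_, ?_, ?_, ?_⟩
      · exact PySem.Dict.nodup_keys_insert _ _ _ hnd1
      · intro k; rw [hg2]
        by_cases hkt : k = t
        · simp [hkt]
        · simp only [if_neg hkt, hg1]
          by_cases hks : k = s
          · simp only [if_pos hks]; have := hnn s; omega
          · simp only [if_neg hks]; exact hnn k
      · intro c; rw [hk2]; simp only [List.mem_append, List.mem_singleton]
        constructor
        · rintro (h | h) <;> [exact Or.inl h; exact Or.inr (Or.inr h)]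
        · rintro (h | rfl | rfl) <;> [exact Or.inl h; exact Or.inl hsk; exact Or.inr rfl]
      · unfold pvZK
        rw [hk2, List.filter_append]
        have hmain : List.filter (fun k => ((d.modify s 0 (· + 1)).insert t 0).getD k 0 == 0) d.keys
            = List.filter (fun c => !decide (c = s)) (pvZK d) := by
          unfold pvZK
          rw [List.filter_filter]
          apply List.filter_congr
          intro c hc
          rw [hg2, if_neg (by rintro rfl; exact htk hc), hg1]
          by_cases hcs : c = s
          · subst hcs
            have : (d.getD c 0 + 1 == 0) = false := by have := hnn c; simp; omega
            simp [this]
          · simp [hcs]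
        rw [hmain]
        have htfil : List.filter (fun k => ((d.modify s 0 (· + 1)).insert t 0).getD k 0 == 0) [t] = [t] := by
          rw [List.filter_singleton, hg2, if_pos rfl]; simp
        rw [htfil, if_neg (by simp [htk, hts])]
        unfold pvZK
        rfl
  · -- fresh source: d1 = d.insert s 1
    have hsk : ¬ s ∈ d.keys := fun hm => hs ((PySem.Dict.contains_iff_mem_keys d s).mpr hm)
    have hsf : d.contains s = false := by
      cases h : d.contains s
      · rfl
      · exact absurd h hs
    have hk1 : (d.insert s 1).keys = d.keys ++ [s] :=
      PySem.Dict.keys_insert_of_not_contains d 1 hsf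
    have hg1 : ∀ k, (d.insert s 1).getD k 0 = if k = s then 1 else d.getD k 0 := by
      intro k; exact PySem.Dict.getD_insert _ _ _ _ _
    have hnd1 : (d.insert s 1).keys.Nodup := PySem.Dict.nodup_keys_insert _ _ _ hnd
    have hz1 : pvZK (d.insert s 1) = (pvZK d).filter (fun c => !decide (c = s)) := by
      unfold pvZK
      rw [hk1, List.filter_append, List.filter_filter]
      have h1 : List.filter (fun k => (d.insert s 1).getD k 0 == 0) [s] = [] := by
        simp [hg1]
      rw [h1, List.append_nil]
      apply List.filter_congr
      intro c hc
      have hcs : c ≠ s := fun h => hsk (h ▸ hc)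
      rw [hg1, if_neg hcs]
      simp [hcs]
    simp only [pvStep, if_neg hs]
    by_cases ht : (d.insert s 1).contains t = true
    · have htm : t ∈ (d.insert s 1).keys := (PySem.Dict.contains_iff_mem_keys _ t).mp ht
      have htks : t ∈ d.keys ∨ t = s := by
        rw [hk1] at htm; simpa using htm
      simp only [if_pos ht]
      refine ⟨hnd1, ?_, ?_, ?_⟩
      · intro k; rw [hg1]
        by_cases hks : k = s
        · simp [hks]
        · simp only [if_neg hks]; exact hnn k
      · intro c; rw [hk1]; simp only [List.mem_append, List.mem_singleton]
        constructor
        · rintro (h | h) <;> [exact Or.inl h; exact Or.inr (Or.inl h)]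
        · rintro (h | rfl | rfl)
          · exact Or.inl h
          · exact Or.inr rfl
          · rcases htks with h | h <;> [exact Or.inl h; exact Or.inr h]
      · rw [hz1]
        have : (if t ∈ d.keys ∨ t = s then ([] : List String) else [t]) = [] := by
          simp [htks]
        rw [this, List.append_nil]
    · have hne : (d.insert s 1).contains t = false := by
        cases h : (d.insert s 1).contains t
        · rfl
        · exact absurd h ht
      have htm : ¬ t ∈ (d.insert s 1).keys := fun hm =>
        ht ((PySem.Dict.contains_iff_mem_keys _ t).mpr hm)
      have htk : ¬ t ∈ d.keys := fun h => htm (by rw [hk1]; simp [h])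
      have hts : t ≠ s := fun h => htm (by rw [hk1]; simp [h])
      simp only [if_neg ht]
      have hk2 : ((d.insert s 1).insert t 0).keys = (d.keys ++ [s]) ++ [t] := by
        rw [PySem.Dict.keys_insert_of_not_contains _ _ hne, hk1]
      have hg2 : ∀ k, ((d.insert s 1).insert t 0).getD k 0 =
          if k = t then 0 else (d.insert s 1).getD k 0 := by
        intro k; exact PySem.Dict.getD_insert _ _ _ _ _
      refine ⟨?_, ?_, ?_, ?_⟩
      · exact PySem.Dict.nodup_keys_insert _ _ _ (PySem.Dict.nodup_keys_insert _ _ _ hnd)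
      · intro k; rw [hg2]
        by_cases hkt : k = t
        · simp [hkt]
        · simp only [if_neg hkt, hg1]
          by_cases hks : k = s
          · simp [hks]
          · simp only [if_neg hks]; exact hnn k
      · intro c; rw [hk2]; simp only [List.mem_append, List.mem_singleton]
        tauto
      · unfold pvZK
        rw [hk2, List.filter_append, List.filter_append]
        have h1 : List.filter (fun k => ((d.insert s 1).insert t 0).getD k 0 == 0) d.keys
            = List.filter (fun c => !decide (c = s)) (pvZK d) := by
          unfold pvZK
          rw [List.filter_filter]
          apply List.filter_congr
          intro c hc
          have hct : c ≠ t := fun h => htk (h ▸ hc)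
          have hcs : c ≠ s := fun h => hsk (h ▸ hc)
          rw [hg2, if_neg hct, hg1, if_neg hcs]
          simp [hcs]
        have h2 : List.filter (fun k => ((d.insert s 1).insert t 0).getD k 0 == 0) [s] = [] := by
          rw [List.filter_singleton]
          rw [hg2, if_neg (Ne.symm hts), hg1, if_pos rfl]
          simp
        have h3 : List.filter (fun k => ((d.insert s 1).insert t 0).getD k 0 == 0) [t] = [t] := by
          rw [List.filter_singleton]
          rw [hg2, if_pos rfl]
          simp
        rw [h1, h2, h3, List.append_nil, if_neg (by simp [htk, hts])]
        congr 1

lemma pvMain (l : List (String × String)) :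
    (l.foldl pvStep PySem.Dict.empty).keys.Nodup ∧
    (∀ k, (0:Int) ≤ (l.foldl pvStep PySem.Dict.empty).getD k 0) ∧
    (∀ c, c ∈ (l.foldl pvStep PySem.Dict.empty).keys ↔ c ∈ l.map Prod.fst ∨ c ∈ l.map Prod.snd) ∧
    pvZK (l.foldl pvStep PySem.Dict.empty) =
      (PySem.List.dedup (l.map Prod.snd)).filter (fun c => !decide (c ∈ l.map Prod.fst)) := by
  induction l using List.reverseRecOn with
  | nil =>
      refine ⟨by simp [PySem.Dict.keys_empty], fun k => by simp [PySem.Dict.getD_empty], fun c => by simp, ?_⟩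
      simp [pvZK, PySem.Dict.keys_empty, PySem.List.dedup]
  | append_singleton l p ih =>
      obtain ⟨hnd, hnn, hmem, hzk⟩ := ih
      obtain ⟨s, t⟩ := p
      rw [List.foldl_append, List.foldl_cons, List.foldl_nil]
      set d := l.foldl pvStep PySem.Dict.empty with hd
      obtain ⟨hnd2, hnn2, hmem2, hzk2⟩ := pvStepFacts d s t hnd hnn
      refine ⟨hnd2, hnn2, ?_, ?_⟩
      · intro c
        rw [hmem2 c]
        simp only [List.map_append, List.map_cons, List.map_nil, List.mem_append,
          List.mem_singleton, hmem c]
        tauto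
      · rw [hzk2, hzk]
        have hded : PySem.List.dedup ((l ++ [(s, t)]).map Prod.snd)
            = if t ∈ l.map Prod.snd then PySem.List.dedup (l.map Prod.snd)
              else PySem.List.dedup (l.map Prod.snd) ++ [t] := by
          rw [List.map_append, PySem.List.dedup_eq_ofList, PySem.Set.ofList_eq_foldl,
            List.foldl_append, ← PySem.Set.ofList_eq_foldl]
          simp only [List.map_cons, List.map_nil, List.foldl_cons, List.foldl_nil]
          rw [PySem.Set.add]
          by_cases hmemt : t ∈ l.map Prod.snd
          · rw [if_pos (by simp [PySem.Set.contains, PySem.Set.mem_ofList, hmemt]), if_pos hmemt]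
            rw [PySem.List.dedup_eq_ofList]
          · rw [if_neg (by simp [PySem.Set.contains, PySem.Set.mem_ofList, hmemt]), if_neg hmemt]
            rw [PySem.List.dedup_eq_ofList]
        have hsrc : (l ++ [(s, t)]).map Prod.fst = l.map Prod.fst ++ [s] := by simp
        rw [hded, hsrc]
        have hff : List.filter (fun c => !decide (c ∈ l.map Prod.fst ++ [s]))
              (PySem.List.dedup (l.map Prod.snd))
            = List.filter (fun c => !decide (c = s))
                (List.filter (fun c => !decide (c ∈ l.map Prod.fst)) (PySem.List.dedup (l.map Prod.snd))) := by
          rw [List.filter_filter]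
          apply List.filter_congr
          intro c _
          by_cases h : c = s <;> by_cases h2 : c ∈ List.map Prod.fst l <;> simp [h, h2]
        by_cases hmemt : t ∈ l.map Prod.snd
        · rw [if_pos hmemt, if_pos (Or.inl ((hmem t).mpr (Or.inr hmemt))), List.append_nil, hff]
        · rw [if_neg hmemt, List.filter_append, hff]
          by_cases hcond : t ∈ d.keys ∨ t = s
          · rw [if_pos hcond]
            have hfe : List.filter (fun c => !decide (c ∈ l.map Prod.fst ++ [s])) [t] = [] := by
              rcases hcond with h | h
              · rcases (hmem t).mp h with h' | h'
                · simp [h']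
                · exact absurd h' hmemt
              · simp [h]
            rw [hfe, List.append_nil]
          · rw [if_neg hcond]
            rw [not_or] at hcond
            have htf : t ∉ l.map Prod.fst := fun h => hcond.1 ((hmem t).mpr (Or.inl h))
            have hfe : List.filter (fun c => !decide (c ∈ l.map Prod.fst ++ [s])) [t] = [t] := by
              simp [List.mem_append, htf, hcond.2]
            rw [hfe]

-- ===== VERDICT (by name: the statement is the Claim_ definition above) =====
theorem Solution_spec : Claim_equal_Solution := by
  unfold Claim_equal_Solution
  intro paths _ _
  unfold Spec_Solution
  have hA : Solution paths =
      pvFirstZero (List.foldl pvStep PySem.Dict.empty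
        (paths.map (fun p => (PySem.List.pyGetD p 0 "", PySem.List.pyGetD p 1 "")))).items := by
    simp only [Solution, List.foldl_map]
    rfl
  obtain ⟨hnd, hnn, hmem, hzk⟩ :=
    pvMain (paths.map (fun p => (PySem.List.pyGetD p 0 "", PySem.List.pyGetD p 1 "")))
  set l := paths.map (fun p => (PySem.List.pyGetD p 0 "", PySem.List.pyGetD p 1 "")) with hl
  set d := l.foldl pvStep PySem.Dict.empty with hd
  have hA2 : Solution paths = ((pvZK d).head?).getD "" := by
    rw [hA, PySem.Dict.items_eq_map_keys d hnd 0,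
      pvFirstZero_map d.keys (fun k => d.getD k 0)]
    rfl
  have hsl : l.map Prod.fst = paths.map (fun p => PySem.List.pyGetD p 0 "") := by
    simp only [hl, List.map_map]
    rfl
  have hdl : l.map Prod.snd = paths.map (fun p => PySem.List.pyGetD p 1 "") := by
    simp only [hl, List.map_map]
    rfl
  rw [hA2, hzk, hsl, hdl, Solution_alt, pvFindB_eq,
    pvHeadFilterDedup (paths.map (fun p => PySem.List.pyGetD p 1 ""))
      (fun c => !decide (c ∈ paths.map (fun p => PySem.List.pyGetD p 0 "")))]
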